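-- pv_equiv track=rewrite | github.com/Tomie56/MathGeo | scripts/tools/gen2solve.py | extract_geometry_ids
-- ===== SOURCE A (Python) =====
-- def extract_geometry_ids(json_data):
--     """提取JSON中所有几何元素ID，用于LLM生成带ID的问题"""
--     ids = {
--         "points": [p["id"] for p in json_data.get("points", [])],
--         "lines": [l["id"] for l in json_data.get("lines", [])],
--         "arcs": [a["id"] for a in json_data.get("arcs", [])],
--         "entities": [e["id"] for e in json_data.get("entities", []) if "id" in e],
--         "entity_types": [e["type"] for e in json_data.get("entities", []) if "type" in e]
--     }
--     # 补充阴影区域标签（如果有）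
--     shadow_labels = [e.get("region_label") for e in json_data.get("entities", []) if e.get("type") == "shadow"]
--     ids["shadow_regions"] = [f"shadow_{l}" for l in shadow_labels if l is not None]
--     return ids
-- ===== SOURCE B (Python) =====
-- def extract_geometry_ids(json_data):
--     """提取JSON中所有几何元素ID，用于LLM生成带ID的问题"""
--     points, lines, arcs = [], [], []
--     entities, entity_types, shadow_regions = [], [], []
--     # one dispatch loop over the input dict's items instead of keyed lookups + scans
--     for key, val in json_data.items():
--         if key == "points":
--             points = [d["id"] for d in val]
--         elif key == "lines":
--             lines = [d["id"] for d in val]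
--         elif key == "arcs":
--             arcs = [d["id"] for d in val]
--         elif key == "entities":
--             for e in val:
--                 if "id" in e:
--                     entities.append(e["id"])
--                 if "type" in e:
--                     entity_types.append(e["type"])
--                 if e.get("type") == "shadow":
--                     l = e.get("region_label")
--                     if l is not None:
--                         shadow_regions.append(f"shadow_{l}")
--     return {"points": points, "lines": lines, "arcs": arcs,
--             "entities": entities, "entity_types": entity_types,
--             "shadow_regions": shadow_regions}
-- ===== Notes on version B (the rewrite author's own statement) =====
-- stated objective: alternative
-- what changed: B inverts the traversal: instead of A's six output-driven keyed lookups/scans of json_data (.get per output key, three separate scans of entities), B walks json_data.items() ONCE and dispatches on each key into six accumulator lists, fusing the three entity pipelines into one inner loop; Pre_ excludes inputs where A raises KeyError (a points/lines/arcs record without an 'id' key) and association lists with duplicate top-level keys, which no real Python dict can represent, so first-match lookup (A's port) vs visit-every-pair iteration (B's port) is an accidental corner there.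
import Mathlib
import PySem

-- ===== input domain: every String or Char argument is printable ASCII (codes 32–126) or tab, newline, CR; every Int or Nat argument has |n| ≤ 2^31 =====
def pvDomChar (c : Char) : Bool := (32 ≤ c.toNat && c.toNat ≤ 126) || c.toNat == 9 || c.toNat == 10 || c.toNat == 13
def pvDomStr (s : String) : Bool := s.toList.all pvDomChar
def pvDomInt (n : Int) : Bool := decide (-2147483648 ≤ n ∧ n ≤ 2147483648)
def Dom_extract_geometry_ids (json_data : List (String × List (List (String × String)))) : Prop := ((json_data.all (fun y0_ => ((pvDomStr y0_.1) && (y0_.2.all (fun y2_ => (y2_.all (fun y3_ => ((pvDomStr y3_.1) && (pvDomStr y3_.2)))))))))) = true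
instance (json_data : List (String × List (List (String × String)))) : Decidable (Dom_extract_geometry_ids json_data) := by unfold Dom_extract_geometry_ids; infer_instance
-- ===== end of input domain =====

-- B inverts the traversal: one dispatch pass over json_data's items into six accumulator
-- lists, instead of A's six output-driven keyed lookups/scans; return values proved equal on Pre_.

-- ===== PORT A =====
-- helpers shared by both ports: json_data.get(k, []) and entity-dict get/contains
def pvGetLists (json_data : List (String × List (List (String × String)))) (k : String) : List (List (String × String)) :=
  (PySem.Dict.mk json_data).getD k []

def pvEGet (e : List (String × String)) (k : String) : Option String :=
  (PySem.Dict.mk e).get? k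

def pvEHas (e : List (String × String)) (k : String) : Bool :=
  (PySem.Dict.mk e).contains k

-- p["id"] is ported as (pvEGet p "id").getD ""; Pre_ guarantees the key is present (Python raises KeyError otherwise)
def extract_geometry_ids (json_data : List (String × List (List (String × String)))) : List (String × List String) :=
  let ids : List (String × List String) :=
    [("points", (pvGetLists json_data "points").map (fun p => (pvEGet p "id").getD "")),
     ("lines", (pvGetLists json_data "lines").map (fun l => (pvEGet l "id").getD "")),
     ("arcs", (pvGetLists json_data "arcs").map (fun a => (pvEGet a "id").getD "")),
     ("entities", ((pvGetLists json_data "entities").filter (fun e => pvEHas e "id")).map (fun e => (pvEGet e "id").getD "")),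
     ("entity_types", ((pvGetLists json_data "entities").filter (fun e => pvEHas e "type")).map (fun e => (pvEGet e "type").getD ""))]
  let shadow_labels : List (Option String) :=
    ((pvGetLists json_data "entities").filter (fun e => pvEGet e "type" == some "shadow")).map (fun e => pvEGet e "region_label")
  ids ++ [("shadow_regions", (shadow_labels.filter Option.isSome).map (fun l => "shadow_" ++ l.getD ""))]

-- ===== PORT B =====
-- B's state: the six local lists of Source B
structure PvSt where
  points : List String
  lines : List String
  arcs : List String
  entities : List String
  entity_types : List String
  shadow_regions : List String
deriving Repr, DecidableEq

-- the inner 'for e in val' loop body of Source B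
def pvEntStep (st : PvSt) (e : List (String × String)) : PvSt :=
  let st := if pvEHas e "id" then { st with entities := st.entities ++ [(pvEGet e "id").getD ""] } else st
  let st := if pvEHas e "type" then { st with entity_types := st.entity_types ++ [(pvEGet e "type").getD ""] } else st
  if pvEGet e "type" == some "shadow" then
    match pvEGet e "region_label" with
    | some l => { st with shadow_regions := st.shadow_regions ++ ["shadow_" ++ l] }
    | none => st
  else st

-- the per-item key dispatch of Source B's 'for key, val in json_data.items()'
def pvDispatch (st : PvSt) (kv : String × List (List (String × String))) : PvSt :=
  if kv.1 == "points" then { st with points := kv.2.map (fun d => (pvEGet d "id").getD "") }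
  else if kv.1 == "lines" then { st with lines := kv.2.map (fun d => (pvEGet d "id").getD "") }
  else if kv.1 == "arcs" then { st with arcs := kv.2.map (fun d => (pvEGet d "id").getD "") }
  else if kv.1 == "entities" then kv.2.foldl pvEntStep st
  else st

def extract_geometry_ids_alt (json_data : List (String × List (List (String × String)))) : List (String × List String) :=
  let st := json_data.foldl pvDispatch ⟨[], [], [], [], [], []⟩
  [("points", st.points), ("lines", st.lines), ("arcs", st.arcs),
   ("entities", st.entities), ("entity_types", st.entity_types),
   ("shadow_regions", st.shadow_regions)]

-- ===== PRECONDITION & SPEC =====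
-- Pre_ excludes (a) inputs where Python A raises KeyError — a points/lines/arcs record without an "id"
-- key — and (b) association lists with duplicate top-level keys, which no real Python dict can
-- represent (first-match lookup vs visit-every-pair iteration is an accidental corner there).
def Pre_extract_geometry_ids (json_data : List (String × List (List (String × String)))) : Prop :=
  ((((pvGetLists json_data "points").all (fun p => pvEHas p "id")) &&
    ((pvGetLists json_data "lines").all (fun l => pvEHas l "id")) &&
    ((pvGetLists json_data "arcs").all (fun a => pvEHas a "id"))) = true) ∧
  (json_data.map Prod.fst).Nodup
instance (json_data : List (String × List (List (String × String)))) : Decidable (Pre_extract_geometry_ids json_data) := by unfold Pre_extract_geometry_ids; infer_instance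

def pvWitness_extract_geometry_ids : (List (String × List (List (String × String)))) :=
  [("points", [[("id", "p1")]]),
   ("entities", [[("type", "shadow"), ("region_label", "R")], [("id", "e1")]])]

def Spec_extract_geometry_ids (json_data : List (String × List (List (String × String)))) (out : List (String × List String)) : Prop := out = extract_geometry_ids_alt json_data
instance (json_data : List (String × List (List (String × String)))) (out : List (String × List String)) : Decidable (Spec_extract_geometry_ids json_data out) := by unfold Spec_extract_geometry_ids; infer_instance

-- ===== CLAIM (what is proved, stated in full; the proofs are below) =====
def Claim_equal_extract_geometry_ids : Prop := ∀ (json_data : List (String × List (List (String × String)))), Dom_extract_geometry_ids json_data → Pre_extract_geometry_ids json_data → Spec_extract_geometry_ids json_data (extract_geometry_ids json_data)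

-- ===== LEMMAS AND PROOFS =====
-- A's three entity pipelines, as named functions for the proof
def pvEIds (es : List (List (String × String))) : List String :=
  (es.filter (fun e => pvEHas e "id")).map (fun e => (pvEGet e "id").getD "")
def pvETypes (es : List (List (String × String))) : List String :=
  (es.filter (fun e => pvEHas e "type")).map (fun e => (pvEGet e "type").getD "")
def pvEShadow (es : List (List (String × String))) : List String :=
  (((es.filter (fun e => pvEGet e "type" == some "shadow")).map (fun e => pvEGet e "region_label")).filter Option.isSome).map (fun l => "shadow_" ++ l.getD "")

-- B's inner loop computes exactly A's three entity pipelines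
lemma pvEntStep_foldl (es : List (List (String × String))) (st : PvSt) :
    es.foldl pvEntStep st =
    { st with entities := st.entities ++ pvEIds es,
              entity_types := st.entity_types ++ pvETypes es,
              shadow_regions := st.shadow_regions ++ pvEShadow es } := by
  induction es generalizing st with
  | nil => simp [pvEIds, pvETypes, pvEShadow]
  | cons e es ih =>
    simp only [List.foldl_cons, pvEntStep, pvEIds, pvETypes, pvEShadow, List.filter_cons]
    by_cases h1 : pvEHas e "id" = true <;>
    by_cases h2 : pvEHas e "type" = true <;>
    by_cases h3 : (pvEGet e "type" == some "shadow") = true <;>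
    rcases hl : pvEGet e "region_label" with _ | l <;>
    simp [h1, h2, h3, hl, ih, pvEIds, pvETypes, pvEShadow, List.append_assoc]

-- B's dispatch fold, characterised by first-match lookups (needs distinct top-level keys)
lemma pvDispatch_foldl (jd : List (String × List (List (String × String)))) (st : PvSt)
    (h : (jd.map Prod.fst).Nodup) :
    jd.foldl pvDispatch st =
    { points := match (PySem.Dict.mk jd).get? "points" with
                | some v => v.map (fun d => (pvEGet d "id").getD "")
                | none => st.points,
      lines := match (PySem.Dict.mk jd).get? "lines" with
                | some v => v.map (fun d => (pvEGet d "id").getD "")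
                | none => st.lines,
      arcs := match (PySem.Dict.mk jd).get? "arcs" with
                | some v => v.map (fun d => (pvEGet d "id").getD "")
                | none => st.arcs,
      entities := st.entities ++ pvEIds ((PySem.Dict.mk jd).getD "entities" []),
      entity_types := st.entity_types ++ pvETypes ((PySem.Dict.mk jd).getD "entities" []),
      shadow_regions := st.shadow_regions ++ pvEShadow ((PySem.Dict.mk jd).getD "entities" []) } := by
  induction jd generalizing st with
  | nil =>
    simp [PySem.Dict.get?, PySem.Dict.getD, pvEIds, pvETypes, pvEShadow]
  | cons kv rest ih =>
    obtain ⟨k, v⟩ := kv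
    simp only [List.map_cons, List.nodup_cons] at h
    obtain ⟨hk, hrest⟩ := h
    have h0 : (PySem.Dict.mk rest).get? k = none := by
      rw [PySem.Dict.get?_eq_none_iff_not_mem_keys]
      simpa [PySem.Dict.keys] using hk
    rw [List.foldl_cons]
    by_cases hp : k = "points"
    · subst hp
      rw [show pvDispatch st ("points", v) = { st with points := v.map (fun d => (pvEGet d "id").getD "") } from rfl,
          ih _ hrest]
      simp [PySem.Dict.get?_mk_cons, h0, PySem.Dict.getD_eq_get?_getD]
    · by_cases hl : k = "lines"
      · subst hl
        rw [show pvDispatch st ("lines", v) = { st with lines := v.map (fun d => (pvEGet d "id").getD "") } from rfl,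
            ih _ hrest]
        simp [PySem.Dict.get?_mk_cons, h0, PySem.Dict.getD_eq_get?_getD]
      · by_cases ha : k = "arcs"
        · subst ha
          rw [show pvDispatch st ("arcs", v) = { st with arcs := v.map (fun d => (pvEGet d "id").getD "") } from rfl,
              ih _ hrest]
          simp [PySem.Dict.get?_mk_cons, h0, PySem.Dict.getD_eq_get?_getD]
        · by_cases he : k = "entities"
          · subst he
            rw [show pvDispatch st ("entities", v) = v.foldl pvEntStep st from rfl,
                pvEntStep_foldl, ih _ hrest]
            simp [PySem.Dict.get?_mk_cons, h0, PySem.Dict.getD_eq_get?_getD, pvEIds, pvETypes, pvEShadow]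
          · have hd : pvDispatch st (k, v) = st := by
              simp [pvDispatch, hp, hl, ha, he]
            rw [hd, ih _ hrest]
            simp [PySem.Dict.get?_mk_cons, PySem.Dict.getD_eq_get?_getD, hp, hl, ha, he]

theorem extract_geometry_ids_spec : Claim_equal_extract_geometry_ids := by
  intro json_data _ hpre
  unfold Spec_extract_geometry_ids extract_geometry_ids extract_geometry_ids_alt
  rw [pvDispatch_foldl _ _ hpre.2]
  rcases h1 : (PySem.Dict.mk json_data).get? "points" with _ | v1 <;>
  rcases h2 : (PySem.Dict.mk json_data).get? "lines" with _ | v2 <;>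
  rcases h3 : (PySem.Dict.mk json_data).get? "arcs" with _ | v3 <;>
  simp [pvGetLists, PySem.Dict.getD_eq_get?_getD, h1, h2, h3, pvEIds, pvETypes, pvEShadow]

-- ===== VERDICT (by name: the statement is the Claim_ definition above) =====
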